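-- pv_equiv track=rewrite | github.com/ThomasLeibundgut/ARS22 | EDCS_Find_Migrants_quick.py | get_legal_status
-- ===== SOURCE A (Python) =====
-- def get_legal_status(row):
--     """
--     Takes in a row of the migrants dataframe.
--     Loops over the cleantext, checking each word as to whether it is indicative
--     of legal status. The first such word determines the legal status, and
--     a corresponding number is returned.
--     """
--     slave = ['servus', 'servi', 'servo', 'servum', 'servom', 'servorum',
--              'servis', 'servos', 'serva', 'servae', 'servai', 'servam',
--              'servarum', 'servas', 'servabus']
--     freed = ['libertus', 'liberti', 'liberto', 'libertum', 'libertom',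
--              'liberte', 'libertorum', 'libertis', 'libertos', 'liberta',
--              'libertae', 'libertai', 'libertam', 'libertad', 'libertarum',
--              'libertabus']  # without 'libertas'
--     free = ['filia', 'filiae', 'filiai', 'filiam', 'filiad', 'filiarum',
--             'filiabus', 'filias', 'filius', 'fili', 'filii', 'filio',
--             'filium', 'filiom', 'filiorum', 'filios']
--     if isinstance(row['cleantext'], str):
--         words = row['cleantext'].split()
--         for word in words:
--             if word.lower() in slave:
--                 return 0
--             if word.lower() in freed:
--                 return 1
--             if word.lower() in free:
--                 return 2
--     return -1
-- ===== SOURCE B (Python) =====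
-- def get_legal_status(row):
--     slave = ['servus', 'servi', 'servo', 'servum', 'servom', 'servorum',
--              'servis', 'servos', 'serva', 'servae', 'servai', 'servam',
--              'servarum', 'servas', 'servabus']
--     freed = ['libertus', 'liberti', 'liberto', 'libertum', 'libertom',
--              'liberte', 'libertorum', 'libertis', 'libertos', 'liberta',
--              'libertae', 'libertai', 'libertam', 'libertad', 'libertarum',
--              'libertabus']
--     free = ['filia', 'filiae', 'filiai', 'filiam', 'filiad', 'filiarum',
--             'filiabus', 'filias', 'filius', 'fili', 'filii', 'filio',
--             'filium', 'filiom', 'filiorum', 'filios']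
--     cleantext = row['cleantext']
--     if not isinstance(cleantext, str):
--         return -1
--     # index the text once: first-occurrence position of each (lowered) word
--     first = {}
--     i = 0
--     for w in cleantext.split():
--         lw = w.lower()
--         if lw not in first:
--             first[lw] = i
--         i += 1
--     # scan the vocabulary (not the text): earliest-occurring vocab word wins
--     best = None  # (position, status)
--     for status, vocab in enumerate((slave, freed, free)):
--         for v in vocab:
--             p = first.get(v)
--             if p is not None and (best is None or p < best[0]):
--                 best = (p, status)
--     return best[1] if best is not None else -1
-- ===== Notes on version B (the rewrite author's own statement) =====
-- stated objective: alternative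
-- what changed: A scans the text word by word testing each against three vocabulary lists; B inverts the traversal: it builds a first-occurrence position index of the text once, then scans the 47 vocabulary words and returns the status of the vocabulary word with the minimum position.
import Mathlib
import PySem

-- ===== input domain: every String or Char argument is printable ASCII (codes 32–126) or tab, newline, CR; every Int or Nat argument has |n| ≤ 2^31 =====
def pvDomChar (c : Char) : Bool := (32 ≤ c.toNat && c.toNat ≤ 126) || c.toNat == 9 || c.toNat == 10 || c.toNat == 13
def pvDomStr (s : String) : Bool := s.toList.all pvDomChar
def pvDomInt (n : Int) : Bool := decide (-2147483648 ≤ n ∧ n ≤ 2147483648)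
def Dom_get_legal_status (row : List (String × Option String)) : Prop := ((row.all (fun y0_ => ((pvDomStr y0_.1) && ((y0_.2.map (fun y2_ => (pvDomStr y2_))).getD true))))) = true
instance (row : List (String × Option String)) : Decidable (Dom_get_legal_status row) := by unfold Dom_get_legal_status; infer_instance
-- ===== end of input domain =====

-- B replaces A's text scan with three membership tests per word by a different algorithm:
-- it indexes the text once (first-occurrence position of each lowered word) and then scans
-- the 47-word VOCABULARY, returning the status of the vocabulary word at the minimum position.
set_option maxRecDepth 100000


-- ===== PORT A =====
def slaveL : List String := ["servus", "servi", "servo", "servum", "servom", "servorum",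
  "servis", "servos", "serva", "servae", "servai", "servam", "servarum", "servas", "servabus"]
def freedL : List String := ["libertus", "liberti", "liberto", "libertum", "libertom",
  "liberte", "libertorum", "libertis", "libertos", "liberta", "libertae", "libertai",
  "libertam", "libertad", "libertarum", "libertabus"]
def freeL : List String := ["filia", "filiae", "filiai", "filiam", "filiad", "filiarum",
  "filiabus", "filias", "filius", "fili", "filii", "filio", "filium", "filiom", "filiorum", "filios"]

-- the for-loop of A: three membership tests per word, first hit returns
def loopA : List String → Option Int
  | [] => none
  | w :: ws =>
    if PySem.Str.lower w ∈ slaveL then some 0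
    else if PySem.Str.lower w ∈ freedL then some 1
    else if PySem.Str.lower w ∈ freeL then some 2
    else loopA ws

def get_legal_status (row : List (String × Option String)) : Int :=
  match row.lookup "cleantext" with
  | some (some s) =>
    match loopA (PySem.Str.split₀ s) with
    | some k => k
    | none => -1
  | _ => -1

-- ===== PORT B =====
-- B's own copies of the three vocabularies (Source B re-declares them)
def slaveB : List String := ["servus", "servi", "servo", "servum", "servom", "servorum",
  "servis", "servos", "serva", "servae", "servai", "servam", "servarum", "servas", "servabus"]
def freedB : List String := ["libertus", "liberti", "liberto", "libertum", "libertom",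
  "liberte", "libertorum", "libertis", "libertos", "liberta", "libertae", "libertai",
  "libertam", "libertad", "libertarum", "libertabus"]
def freeB : List String := ["filia", "filiae", "filiai", "filiam", "filiad", "filiarum",
  "filiabus", "filias", "filius", "fili", "filii", "filio", "filium", "filiom", "filiorum", "filios"]

-- the (vocab word, status) pairs B's vocabulary loop runs over, flattened
def vocabPairs : List (String × Int) :=
  (slaveB.map (fun w => (w, (0 : Int)))) ++ (freedB.map (fun w => (w, (1 : Int))))
    ++ (freeB.map (fun w => (w, (2 : Int))))

-- Source B's first loop: first-occurrence position of each lowered word of the text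
def buildFirst : PySem.Dict String Int → Int → List String → PySem.Dict String Int
  | d, _, [] => d
  | d, i, w :: ws =>
    buildFirst
      (if (d.get? (PySem.Str.lower w)).isNone then d.insert (PySem.Str.lower w) i else d)
      (i + 1) ws

-- one step of Source B's vocabulary loop: keep the (position, status) with minimal position
def stepB (f : String → Option Int) (best : Option (Int × Int)) (p : String × Int) :
    Option (Int × Int) :=
  match f p.1 with
  | none => best
  | some q =>
    match best with
    | none => some (q, p.2)
    | some (bp, _) => if q < bp then some (q, p.2) else best

def get_legal_status_alt (row : List (String × Option String)) : Int :=
  match row.lookup "cleantext" with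
  | none => -1
  | some none => -1
  | some (some s) =>
    let first := buildFirst PySem.Dict.empty 0 (PySem.Str.split₀ s)
    match vocabPairs.foldl (stepB (fun v => first.get? v)) none with
    | some (_, st) => st
    | none => -1

-- ===== PRECONDITION & SPEC =====
-- Pre_ excludes rows without a 'cleantext' key, on which both Pythons raise KeyError.
def Pre_get_legal_status (row : List (String × Option String)) : Prop :=
  "cleantext" ∈ row.map Prod.fst
instance (row : List (String × Option String)) : Decidable (Pre_get_legal_status row) := by
  unfold Pre_get_legal_status; infer_instance
def pvWitness_get_legal_status : (List (String × Option String)) :=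
  [("cleantext", some "hic servus erat")]
def Spec_get_legal_status (row : List (String × Option String)) (out : Int) : Prop := out = get_legal_status_alt row
instance (row : List (String × Option String)) (out : Int) : Decidable (Spec_get_legal_status row out) := by unfold Spec_get_legal_status; infer_instance

-- ===== CLAIM (what is proved, stated in full; the proofs are below) =====
def Claim_equal_get_legal_status : Prop := ∀ (row : List (String × Option String)), Dom_get_legal_status row → Pre_get_legal_status row → Spec_get_legal_status row (get_legal_status row)

-- ===== LEMMAS AND PROOFS =====

-- first-occurrence index of v in a word list (proof-side characterisation of buildFirst)
def fidx (v : String) : List String → Option Nat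
  | [] => none
  | w :: ws => if w = v then some 0 else (fidx v ws).map (· + 1)

theorem buildFirst_get? (ws : List String) : ∀ (d : PySem.Dict String Int) (i : Int) (v : String),
    (buildFirst d i ws).get? v
      = (d.get? v).or ((fidx v (ws.map PySem.Str.lower)).map (fun k => i + Int.ofNat k)) := by
  induction ws with
  | nil => intro d i v; simp [buildFirst, fidx]
  | cons w ws ih =>
    intro d i v
    simp only [buildFirst, List.map_cons, fidx]
    rw [ih]
    have hins : ∀ (j : Int),
        (if (d.get? (PySem.Str.lower w)).isNone then d.insert (PySem.Str.lower w) j else d).get? v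
          = if (d.get? (PySem.Str.lower w)).isNone ∧ v = PySem.Str.lower w then some j
            else d.get? v := by
      intro j
      split
      · rw [PySem.Dict.get?_insert]
        split_ifs with h1 h2 h2 <;> simp_all
      · split_ifs with h1 <;> simp_all
    rw [hins i]
    by_cases hv : PySem.Str.lower w = v
    · subst hv
      cases hd : d.get? (PySem.Str.lower w) with
      | none => simp
      | some x => simp
    · have hv' : ¬ (v = PySem.Str.lower w) := fun h => hv h.symm
      simp only [hv, hv', if_false, and_false]
      cases fidx v (ws.map PySem.Str.lower) with
      | none => simp
      | some k =>
        simp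
        congr 1
        omega

-- lookup over an append
theorem lookup_append (l1 l2 : List (String × Int)) (w : String) :
    List.lookup w (l1 ++ l2) = (List.lookup w l1).or (List.lookup w l2) := by
  induction l1 with
  | nil => simp
  | cons p l1 ih =>
    obtain ⟨k, v⟩ := p
    simp only [List.cons_append, List.lookup]
    cases h : w == k <;> simp [ih]

-- lookup in a constant-valued block
theorem lookup_map_const (xs : List String) (c : Int) (w : String) :
    List.lookup w (xs.map (fun x => (x, c))) = if w ∈ xs then some c else none := by
  induction xs with
  | nil => simp
  | cons x xs ih =>
    simp only [List.map_cons, List.lookup, List.mem_cons, ih]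
    cases h : w == x with
    | true => simp [(beq_iff_eq.mp h)]
    | false =>
      have : ¬ (w = x) := by simpa using h
      simp [this]

-- the vocabulary association list computes A's three membership branches
theorem vocabLookup_eq (w : String) :
    List.lookup w vocabPairs
      = if w ∈ slaveL then some 0 else if w ∈ freedL then some 1
        else if w ∈ freeL then some 2 else none := by
  have hs : slaveB = slaveL := rfl
  have hf : freedB = freedL := rfl
  have hr : freeB = freeL := rfl
  rw [vocabPairs, List.append_assoc, lookup_append, lookup_append,
    lookup_map_const, lookup_map_const, lookup_map_const, hs, hf, hr]
  split_ifs <;> simp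

theorem lookup_none_keys (P : List (String × Int)) (w : String)
    (h : List.lookup w P = none) : ∀ p ∈ P, p.1 ≠ w := by
  induction P with
  | nil => simp
  | cons p P ih =>
    obtain ⟨k, v⟩ := p
    simp only [List.lookup] at h
    cases hk : w == k with
    | true => rw [hk] at h; simp at h
    | false =>
      rw [hk] at h
      intro q hq
      cases hq with
      | head =>
        intro he
        rw [show ((k, v)).1 = k from rfl] at he
        rw [he] at hk
        simp at hk
      | tail _ hq => exact ih h q hq

-- shifting every position by +1 shifts the fold result by +1
theorem foldl_stepB_shift (f g : String → Option Int) :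
    ∀ (P : List (String × Int)), (∀ p ∈ P, f p.1 = (g p.1).map (· + 1)) →
    ∀ (acc : Option (Int × Int)),
    P.foldl (stepB f) (acc.map (fun q => (q.1 + 1, q.2)))
      = (P.foldl (stepB g) acc).map (fun q => (q.1 + 1, q.2)) := by
  intro P
  induction P with
  | nil => intro _ acc; simp
  | cons p P ih =>
    intro h acc
    have hp := h p (List.mem_cons_self)
    simp only [List.foldl_cons]
    have hstep : stepB f (acc.map (fun q => (q.1 + 1, q.2))) p
        = (stepB g acc p).map (fun q => (q.1 + 1, q.2)) := by
      cases hg : g p.1 with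
      | none => simp [stepB, hp, hg]
      | some q =>
        cases acc with
        | none => simp [stepB, hp, hg]
        | some b =>
          cases b with
          | mk bp bs =>
            simp only [stepB, hp, hg, Option.map_some]
            by_cases hlt : q < bp
            · simp [hlt, show q + 1 < bp + 1 by omega]
            · simp [hlt, show ¬ (q + 1 < bp + 1) by omega]
    rw [hstep]
    exact ih (fun q hq => h q (List.mem_cons_of_mem _ hq)) _

-- once the minimum possible position 0 is held, it is never replaced
theorem foldl_stepB_stay (f : String → Option Int)
    (hnn : ∀ v q, f v = some q → 0 ≤ q) (s0 : Int) :
    ∀ (P : List (String × Int)), P.foldl (stepB f) (some (0, s0)) = some (0, s0) := by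
  intro P
  induction P with
  | nil => rfl
  | cons p P ih =>
    simp only [List.foldl_cons]
    have : stepB f (some (0, s0)) p = some (0, s0) := by
      cases hf : f p.1 with
      | none => simp [stepB, hf]
      | some q =>
        have := hnn _ _ hf
        simp [stepB, hf, show ¬ (q < 0) by omega]
    rw [this, ih]

-- if w's position is 0 and every other position is positive, the fold finds w's first status
theorem foldl_stepB_zero (f : String → Option Int) (w : String) (s0 : Int)
    (hw : f w = some 0)
    (hnn : ∀ v q, f v = some q → 0 ≤ q)
    (hpos : ∀ v q, v ≠ w → f v = some q → 0 < q) :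
    ∀ (P : List (String × Int)) (acc : Option (Int × Int)),
    List.lookup w P = some s0 →
    (∀ bp bs, acc = some (bp, bs) → 0 < bp) →
    P.foldl (stepB f) acc = some (0, s0) := by
  intro P
  induction P with
  | nil => intro acc hlk _; simp [List.lookup] at hlk
  | cons p P ih =>
    intro acc hlk hacc
    obtain ⟨k, s⟩ := p
    simp only [List.lookup] at hlk
    simp only [List.foldl_cons]
    cases hk : w == k with
    | true =>
      rw [hk] at hlk
      have hkw : k = w := (beq_iff_eq.mp hk).symm
      have hs : s = s0 := by simpa using hlk
      have hstep : stepB f acc (k, s) = some (0, s0) := by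
        rw [hkw, hs]
        cases acc with
        | none => simp [stepB, hw]
        | some b =>
          obtain ⟨bp, bs⟩ := b
          have := hacc bp bs rfl
          simp [stepB, hw, this]
      rw [hstep]
      exact foldl_stepB_stay f hnn s0 P
    | false =>
      rw [hk] at hlk
      have hkw : k ≠ w := fun he => by rw [he] at hk; simp at hk
      apply ih _ hlk
      intro bp bs hstep
      cases hf : f k with
      | none => simp [stepB, hf] at hstep; exact hacc bp bs (by rw [hstep])
      | some q =>
        have hq := hpos k q hkw hf
        cases acc with
        | none =>
          simp [stepB, hf] at hstep
          omega
        | some b =>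
          obtain ⟨cp, cs⟩ := b
          have hcp := hacc cp cs rfl
          by_cases hlt : q < cp
          · simp [stepB, hf, hlt] at hstep; omega
          · simp [stepB, hf, hlt] at hstep; omega

-- when no vocab word occurs, the fold returns its accumulator
theorem foldl_stepB_none (f : String → Option Int)
    (P : List (String × Int)) (h : ∀ p ∈ P, f p.1 = none) (acc : Option (Int × Int)) :
    P.foldl (stepB f) acc = acc := by
  induction P generalizing acc with
  | nil => rfl
  | cons p P ih =>
    simp only [List.foldl_cons]
    rw [show stepB f acc p = acc by simp [stepB, h p List.mem_cons_self]]
    exact ih (fun q hq => h q (List.mem_cons_of_mem _ hq)) acc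

-- A's scan, as a function of the already-lowered word list
def valP : List String → Int
  | [] => -1
  | w :: ws =>
    match List.lookup w vocabPairs with
    | some s => s
    | none => valP ws

theorem loopA_eq_valP (ws : List String) :
    (match loopA ws with | some k => k | none => (-1 : Int))
      = valP (ws.map PySem.Str.lower) := by
  induction ws with
  | nil => simp [loopA, valP]
  | cons w ws ih =>
    simp only [loopA, List.map_cons, valP, vocabLookup_eq]
    split_ifs <;> simp [ih]

-- B's vocabulary fold over first-occurrence positions equals A's scan
theorem valB_eq (lws : List String) :
    (match vocabPairs.foldl
        (stepB (fun v => (fidx v lws).map Int.ofNat)) none with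
      | some (_, st) => st
      | none => (-1 : Int)) = valP lws := by
  induction lws with
  | nil =>
    rw [foldl_stepB_none _ _ (fun p _ => by simp [fidx])]
    rfl
  | cons w t ih =>
    set f : String → Option Int := fun v => (fidx v (w :: t)).map Int.ofNat with hf
    have hnn : ∀ v q, f v = some q → 0 ≤ q := by
      intro v q h
      simp only [hf, Option.map_eq_some_iff] at h
      obtain ⟨k, _, hk⟩ := h
      rw [← hk, Int.ofNat_eq_natCast]
      exact Int.natCast_nonneg k
    cases hlk : List.lookup w vocabPairs with
    | some s0 =>
      have hw : f w = some 0 := by simp [hf, fidx]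
      have hpos : ∀ v q, v ≠ w → f v = some q → 0 < q := by
        intro v q hvw h
        simp only [hf, fidx, show ¬ (w = v) from fun h' => hvw h'.symm, if_false,
          Option.map_map, Option.map_eq_some_iff] at h
        obtain ⟨k, _, hk⟩ := h
        simp at hk
        omega
      rw [foldl_stepB_zero f w s0 hw hnn hpos vocabPairs none hlk (by simp)]
      simp [valP, hlk]
    | none =>
      have hkeys := lookup_none_keys _ _ hlk
      set g : String → Option Int := fun v => (fidx v t).map Int.ofNat with hg
      have hshift : ∀ p ∈ vocabPairs, f p.1 = (g p.1).map (· + 1) := by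
        intro p hp
        have hne : ¬ (w = p.1) := fun h => hkeys p hp h.symm
        simp only [hf, hg, fidx, hne, if_false, Option.map_map]
        cases fidx p.1 t <;> simp
      have := foldl_stepB_shift f g vocabPairs hshift none
      simp only [Option.map_none] at this
      rw [this]
      rw [show valP (w :: t) = valP t by simp [valP, hlk]]
      rw [← ih]
      cases vocabPairs.foldl (stepB g) none with
      | none => rfl
      | some q => rfl

-- the dict built by Source B's first loop IS the first-occurrence index function
theorem first_get?_eq (ws : List String) :
    (fun v => (buildFirst PySem.Dict.empty 0 ws).get? v)
      = fun v => (fidx v (ws.map PySem.Str.lower)).map Int.ofNat := by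
  funext v
  rw [buildFirst_get?]
  cases fidx v (ws.map PySem.Str.lower) <;> simp [PySem.Dict.get?_empty]

-- ===== VERDICT (by name: the statement is the Claim_ definition above) =====
theorem get_legal_status_spec : Claim_equal_get_legal_status := by
  intro row _ _
  unfold Spec_get_legal_status get_legal_status get_legal_status_alt
  cases h : row.lookup "cleantext" with
  | none => rfl
  | some v =>
    cases v with
    | none => rfl
    | some s =>
      simp only
      rw [first_get?_eq, valB_eq, ← loopA_eq_valP]
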